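-- pv_equiv track=rewrite | github.com/dream123321/OCBF | ocbf/ocbf/das/lmps_scripts.py | _inject_sus2_pair_style
-- ===== SOURCE A (Python) =====
-- def _inject_sus2_pair_style(script_text, mtp_filename):
--     lines = script_text.splitlines()
--     normalized = []
--     inserted = False
--
--     for line in lines:
--         stripped = line.strip()
--
--         if stripped.startswith("# variable mlip_ini"):
--             continue
--         if stripped.startswith("pair_style") and ("mlip" in stripped or "sus2mtp" in stripped):
--             continue
--         if stripped == "pair_coeff * *":
--             continue
--
--         normalized.append(line)
--         if not inserted and stripped.startswith("read_data data.in"):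
--             normalized.append("")
--             normalized.append(f"pair_style sus2mtp {mtp_filename}")
--             normalized.append("pair_coeff * *")
--             inserted = True
--
--     if not inserted:
--         raise ValueError("Could not find 'read_data data.in' in the LAMMPS template")
--
--     return "\n".join(normalized) + "\n"
-- ===== SOURCE B (Python) =====
-- def _inject_sus2_pair_style(script_text, mtp_filename):
--     def dropped(line):
--         s = line.strip()
--         return (s.startswith("# variable mlip_ini")
--                 or (s.startswith("pair_style") and ("mlip" in s or "sus2mtp" in s))
--                 or s == "pair_coeff * *")
--
--     kept = [line for line in script_text.splitlines() if not dropped(line)]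
--     idx = next((i for i, line in enumerate(kept)
--                 if line.strip().startswith("read_data data.in")), None)
--     if idx is None:
--         raise ValueError("Could not find 'read_data data.in' in the LAMMPS template")
--     result = (kept[:idx + 1]
--               + ["", f"pair_style sus2mtp {mtp_filename}", "pair_coeff * *"]
--               + kept[idx + 1:])
--     return "\n".join(result) + "\n"
-- ===== Notes on version B (the rewrite author's own statement) =====
-- stated objective: simpler
-- what changed: Replaces A's single stateful loop with an 'inserted' flag by a filter comprehension, a findIdx search for the read_data line, and one slice-splice of the three injected lines.
-- outside the precondition, e.g. on _inject_sus2_pair_style('units metal', 'f.mtp'): A raises ValueError, B raises ValueError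
import Mathlib
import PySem

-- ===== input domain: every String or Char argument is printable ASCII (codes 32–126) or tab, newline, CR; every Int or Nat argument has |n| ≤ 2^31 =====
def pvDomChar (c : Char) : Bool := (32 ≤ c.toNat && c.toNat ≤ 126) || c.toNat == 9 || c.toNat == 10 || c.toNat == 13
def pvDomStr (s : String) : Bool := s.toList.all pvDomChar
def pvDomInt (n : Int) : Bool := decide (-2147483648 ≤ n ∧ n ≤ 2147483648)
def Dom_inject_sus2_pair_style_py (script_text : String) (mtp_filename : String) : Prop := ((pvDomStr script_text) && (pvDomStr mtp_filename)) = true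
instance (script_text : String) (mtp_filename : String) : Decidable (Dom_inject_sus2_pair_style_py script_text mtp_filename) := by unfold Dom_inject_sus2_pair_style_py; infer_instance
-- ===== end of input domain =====

-- B replaces A's single stateful loop (with an 'inserted' flag) by filter-then-find-then-splice; same O(n) cost, plainer decomposition.
-- Where the Python raises ValueError (no surviving 'read_data data.in' line), both ports return "" — those inputs are outside Pre_.

-- helper predicates shared by both programs (A writes them inline, B as its 'dropped' helper)
def pvDropped (line : String) : Bool :=
  let s := PySem.Str.strip line
  PySem.Str.startswith s "# variable mlip_ini" ||
  (PySem.Str.startswith s "pair_style" && (PySem.Str.isIn "mlip" s || PySem.Str.isIn "sus2mtp" s)) ||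
  (s == "pair_coeff * *")

def pvIsRD (line : String) : Bool :=
  PySem.Str.startswith (PySem.Str.strip line) "read_data data.in"

-- ===== PORT A =====
-- A's for-loop over the lines, carrying (normalized, inserted); the three 'continue's stay separate branches in order.
def pvLoopA (mtp_filename : String) : List String → List String → Bool → List String × Bool
  | [], normalized, inserted => (normalized, inserted)
  | line :: rest, normalized, inserted =>
    let stripped := PySem.Str.strip line
    if PySem.Str.startswith stripped "# variable mlip_ini" then
      pvLoopA mtp_filename rest normalized inserted
    else if PySem.Str.startswith stripped "pair_style" &&
            (PySem.Str.isIn "mlip" stripped || PySem.Str.isIn "sus2mtp" stripped) then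
      pvLoopA mtp_filename rest normalized inserted
    else if stripped == "pair_coeff * *" then
      pvLoopA mtp_filename rest normalized inserted
    else
      let normalized := normalized ++ [line]
      if !inserted && PySem.Str.startswith stripped "read_data data.in" then
        pvLoopA mtp_filename rest
          (normalized ++ ["", "pair_style sus2mtp " ++ mtp_filename, "pair_coeff * *"]) true
      else
        pvLoopA mtp_filename rest normalized inserted

def inject_sus2_pair_style_py (script_text : String) (mtp_filename : String) : String :=
  let lines := PySem.Str.splitlines script_text
  let res := pvLoopA mtp_filename lines [] false
  if res.2 then PySem.Str.join "\n" res.1 ++ "\n"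
  else ""  -- Python raises ValueError here; excluded by Pre_

-- ===== PORT B =====
def inject_sus2_pair_style_py_alt (script_text : String) (mtp_filename : String) : String :=
  let kept := (PySem.Str.splitlines script_text).filter (fun line => !pvDropped line)
  match kept.findIdx? pvIsRD with
  | none => ""  -- Python raises ValueError here; excluded by Pre_
  | some idx =>
    PySem.Str.join "\n"
      (kept.take (idx + 1) ++ ["", "pair_style sus2mtp " ++ mtp_filename, "pair_coeff * *"]
        ++ kept.drop (idx + 1)) ++ "\n"

-- ===== PRECONDITION & SPEC =====
-- Pre_: some line survives the filter and starts (after strip) with 'read_data data.in'; on the rest A raises ValueError.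
def Pre_inject_sus2_pair_style_py (script_text : String) (mtp_filename : String) : Prop :=
  (PySem.Str.splitlines script_text).any (fun line => !pvDropped line && pvIsRD line) = true

instance (script_text : String) (mtp_filename : String) : Decidable (Pre_inject_sus2_pair_style_py script_text mtp_filename) := by
  unfold Pre_inject_sus2_pair_style_py; infer_instance

def pvWitness_inject_sus2_pair_style_py : String × String :=
  ("units metal\nread_data data.in\npair_coeff * *\nrun 10", "pot.mtp")

def Spec_inject_sus2_pair_style_py (script_text : String) (mtp_filename : String) (out : String) : Prop := out = inject_sus2_pair_style_py_alt script_text mtp_filename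
instance (script_text : String) (mtp_filename : String) (out : String) : Decidable (Spec_inject_sus2_pair_style_py script_text mtp_filename out) := by unfold Spec_inject_sus2_pair_style_py; infer_instance

-- ===== CLAIM (what is proved, stated in full; the proofs are below) =====
def Claim_equal_inject_sus2_pair_style_py : Prop := ∀ (script_text : String) (mtp_filename : String), Dom_inject_sus2_pair_style_py script_text mtp_filename → Pre_inject_sus2_pair_style_py script_text mtp_filename → Spec_inject_sus2_pair_style_py script_text mtp_filename (inject_sus2_pair_style_py script_text mtp_filename)

-- ===== LEMMAS AND PROOFS =====

theorem pvDropped_true1 (l : String)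
    (h1 : PySem.Str.startswith (PySem.Str.strip l) "# variable mlip_ini" = true) :
    pvDropped l = true := by
  simp only [pvDropped, h1, Bool.true_or]

theorem pvDropped_true2 (l : String)
    (h2 : (PySem.Str.startswith (PySem.Str.strip l) "pair_style" &&
      (PySem.Str.isIn "mlip" (PySem.Str.strip l) || PySem.Str.isIn "sus2mtp" (PySem.Str.strip l))) = true) :
    pvDropped l = true := by
  simp only [pvDropped, h2, Bool.true_or, Bool.or_true]

theorem pvDropped_true3 (l : String)
    (h3 : (PySem.Str.strip l == "pair_coeff * *") = true) :
    pvDropped l = true := by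
  simp only [pvDropped, h3, Bool.or_true]

theorem pvDropped_false (l : String)
    (h1 : PySem.Str.startswith (PySem.Str.strip l) "# variable mlip_ini" = false)
    (h2 : (PySem.Str.startswith (PySem.Str.strip l) "pair_style" &&
      (PySem.Str.isIn "mlip" (PySem.Str.strip l) || PySem.Str.isIn "sus2mtp" (PySem.Str.strip l))) = false)
    (h3 : (PySem.Str.strip l == "pair_coeff * *") = false) :
    pvDropped l = false := by
  simp only [pvDropped, h1, h2, h3, Bool.or_self]

-- Once inserted, A's loop just appends the surviving lines.
theorem pvLoopA_true (mtp : String) (ls : List String) :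
    ∀ acc, pvLoopA mtp ls acc true = (acc ++ ls.filter (fun l => !pvDropped l), true) := by
  induction ls with
  | nil => intro acc; simp only [pvLoopA, List.filter_nil, List.append_nil]
  | cons l rest ih =>
    intro acc
    simp only [pvLoopA, Bool.not_true, Bool.false_and, Bool.false_eq_true, if_false]
    by_cases h1 : PySem.Str.startswith (PySem.Str.strip l) "# variable mlip_ini" = true
    · rw [if_pos h1, ih, List.filter_cons_of_neg (by simp only [pvDropped_true1 l h1, Bool.not_true, Bool.false_eq_true, not_false_eq_true])]
    · rw [Bool.not_eq_true] at h1
      rw [if_neg (by simp only [h1, Bool.false_eq_true, not_false_eq_true])]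
      by_cases h2 : (PySem.Str.startswith (PySem.Str.strip l) "pair_style" &&
          (PySem.Str.isIn "mlip" (PySem.Str.strip l) || PySem.Str.isIn "sus2mtp" (PySem.Str.strip l))) = true
      · rw [if_pos h2, ih, List.filter_cons_of_neg (by simp only [pvDropped_true2 l h2, Bool.not_true, Bool.false_eq_true, not_false_eq_true])]
      · rw [Bool.not_eq_true] at h2
        rw [if_neg (by simp only [h2, Bool.false_eq_true, not_false_eq_true])]
        by_cases h3 : (PySem.Str.strip l == "pair_coeff * *") = true
        · rw [if_pos h3, ih, List.filter_cons_of_neg (by simp only [pvDropped_true3 l h3, Bool.not_true, Bool.false_eq_true, not_false_eq_true])]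
        · rw [Bool.not_eq_true] at h3
          rw [if_neg (by simp only [h3, Bool.false_eq_true, not_false_eq_true])]
          rw [ih, List.filter_cons_of_pos (by simp only [pvDropped_false l h1 h2 h3, Bool.not_false])]
          simp only [List.append_assoc, List.singleton_append]

-- Before insertion, A's loop computes exactly B's filter-find-splice.
theorem pvLoopA_false (mtp : String) (ls : List String) :
    ∀ acc, pvLoopA mtp ls acc false =
      (match (ls.filter (fun l => !pvDropped l)).findIdx? pvIsRD with
       | none => (acc ++ ls.filter (fun l => !pvDropped l), false)
       | some i =>
         (acc ++ ((ls.filter (fun l => !pvDropped l)).take (i + 1)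
            ++ ["", "pair_style sus2mtp " ++ mtp, "pair_coeff * *"]
            ++ (ls.filter (fun l => !pvDropped l)).drop (i + 1)), true)) := by
  induction ls with
  | nil =>
    intro acc
    simp only [pvLoopA, List.filter_nil, List.findIdx?_nil, List.append_nil]
  | cons l rest ih =>
    intro acc
    simp only [pvLoopA, Bool.not_false, Bool.true_and]
    by_cases h1 : PySem.Str.startswith (PySem.Str.strip l) "# variable mlip_ini" = true
    · rw [if_pos h1, ih, List.filter_cons_of_neg (by simp only [pvDropped_true1 l h1, Bool.not_true, Bool.false_eq_true, not_false_eq_true])]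
    · rw [Bool.not_eq_true] at h1
      rw [if_neg (by simp only [h1, Bool.false_eq_true, not_false_eq_true])]
      by_cases h2 : (PySem.Str.startswith (PySem.Str.strip l) "pair_style" &&
          (PySem.Str.isIn "mlip" (PySem.Str.strip l) || PySem.Str.isIn "sus2mtp" (PySem.Str.strip l))) = true
      · rw [if_pos h2, ih, List.filter_cons_of_neg (by simp only [pvDropped_true2 l h2, Bool.not_true, Bool.false_eq_true, not_false_eq_true])]
      · rw [Bool.not_eq_true] at h2
        rw [if_neg (by simp only [h2, Bool.false_eq_true, not_false_eq_true])]
        by_cases h3 : (PySem.Str.strip l == "pair_coeff * *") = true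
        · rw [if_pos h3, ih, List.filter_cons_of_neg (by simp only [pvDropped_true3 l h3, Bool.not_true, Bool.false_eq_true, not_false_eq_true])]
        · rw [Bool.not_eq_true] at h3
          rw [if_neg (by simp only [h3, Bool.false_eq_true, not_false_eq_true])]
          rw [List.filter_cons_of_pos (by simp only [pvDropped_false l h1 h2 h3, Bool.not_false])]
          rw [List.findIdx?_cons]
          by_cases hr : pvIsRD l = true
          · rw [if_pos (show PySem.Str.startswith (PySem.Str.strip l) "read_data data.in" = true from hr)]
            rw [pvLoopA_true]
            rw [if_pos hr]
            simp only [List.take_succ_cons, List.take_zero, List.drop_succ_cons, List.drop_zero,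
              List.append_assoc]
          · rw [Bool.not_eq_true] at hr
            rw [if_neg (by
              simp only [show PySem.Str.startswith (PySem.Str.strip l) "read_data data.in" = false from hr,
                Bool.false_eq_true, not_false_eq_true])]
            rw [ih, if_neg (by simp only [hr, Bool.false_eq_true, not_false_eq_true])]
            cases hfind : (rest.filter (fun l => !pvDropped l)).findIdx? pvIsRD with
            | none =>
              simp only [Option.map_none, List.append_assoc, List.singleton_append]
            | some i =>
              simp [List.take_succ_cons, List.drop_succ_cons]

theorem inject_sus2_pair_style_py_spec : Claim_equal_inject_sus2_pair_style_py := by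
  intro script_text mtp_filename _ hpre
  unfold Spec_inject_sus2_pair_style_py
  unfold Pre_inject_sus2_pair_style_py at hpre
  unfold inject_sus2_pair_style_py inject_sus2_pair_style_py_alt
  simp only [pvLoopA_false]
  cases hfind : ((PySem.Str.splitlines script_text).filter (fun l => !pvDropped l)).findIdx? pvIsRD with
  | none =>
    exfalso
    rw [List.findIdx?_eq_none_iff] at hfind
    rw [List.any_eq_true] at hpre
    obtain ⟨l, hl, hp⟩ := hpre
    simp only [Bool.and_eq_true] at hp
    exact absurd (hfind l (List.mem_filter.mpr ⟨hl, hp.1⟩)) (by simp [hp.2])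
  | some i => simp
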